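-- pv_equiv track=rewrite | github.com/unknowncito/uknowncito.github.io | CMU_exercises.py | reverseStrings
-- ===== SOURCE A (Python) =====
-- def reverseStrings(L):
--     s= set(L)
--     setty = set() #make an empty set
--     for i in range(len(L)): # loop over the values in the set with index i
--         x = L[i] # x is the value of the set
--         if type(x) is str: # chekc is they are a string
--             trial =(x[::-1]) # we turn x into the reverse of itseld
--             if trial in L: # check if the string is in the list, or is a palindrome
--                 setty.add(trial)
--     return setty
-- ===== SOURCE B (Python) =====
-- def reverseStrings(L):
--     strs = sorted(x for x in L if type(x) is str)
--     def present(t):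
--         lo, hi = 0, len(strs)
--         while lo < hi:
--             mid = (lo + hi) // 2
--             if strs[mid] < t:
--                 lo = mid + 1
--             else:
--                 hi = mid
--         return lo < len(strs) and strs[lo] == t
--     return {x[::-1] for x in L if type(x) is str and present(x[::-1])}
-- ===== Notes on version B (the rewrite author's own statement) =====
-- stated objective: faster
-- what changed: Replaces A's per-element linear `trial in L` scan by sorting the strings once and answering each membership query with a hand-written binary search, so the quadratic inner scan disappears.
import Mathlib
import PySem

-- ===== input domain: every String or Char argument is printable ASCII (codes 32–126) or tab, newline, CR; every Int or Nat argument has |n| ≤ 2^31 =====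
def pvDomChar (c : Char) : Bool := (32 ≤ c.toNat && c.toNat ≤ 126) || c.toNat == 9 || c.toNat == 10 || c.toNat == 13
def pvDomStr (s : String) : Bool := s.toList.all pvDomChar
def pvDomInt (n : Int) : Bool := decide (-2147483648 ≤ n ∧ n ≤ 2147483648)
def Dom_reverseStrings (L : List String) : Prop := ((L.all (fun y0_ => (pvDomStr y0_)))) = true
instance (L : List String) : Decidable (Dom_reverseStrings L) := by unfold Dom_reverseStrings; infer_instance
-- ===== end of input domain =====

-- B replaces A's linear `trial in L` scan inside the loop by a sorted copy of the
-- strings queried with a hand-written binary search (sort once, then one lookup per element).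

-- ===== PORT A =====
-- x[::-1]: step -1 is never 0, so slice? is always `some`; getD "" is unreachable
def pvRev (x : String) : String := (PySem.Str.slice? x none none (-1)).getD ""

def reverseStrings (L : List String) : List String :=
  let _s : PySem.Set String := PySem.Set.ofList L   -- s = set(L), unused by A
  (PySem.List.pyRange 0 (L.length : Int) 1).foldl (fun setty i =>
    let x := PySem.List.pyGetD L i ""               -- x = L[i], i always in range
    -- type(x) is str: always true, L is a list of strings
    let trial := pvRev x
    if L.contains trial then PySem.Set.add setty trial else setty) []

-- ===== PORT B =====
-- the `while lo < hi` binary-search loop of Source B's `present`, returning the final lo;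
-- strs[mid] is always in range (0 ≤ lo ≤ mid < hi ≤ len strs)
def pvBsearch (strs : List String) (t : String) (lo hi : Nat) : Nat :=
  if lo < hi then
    let mid := (lo + hi) / 2
    if PySem.List.pyGetD strs (mid : Int) "" < t then pvBsearch strs t (mid + 1) hi
    else pvBsearch strs t lo mid
  else lo
termination_by hi - lo
decreasing_by all_goals omega

-- Source B's `present(t)`
def pvPresent (strs : List String) (t : String) : Bool :=
  let lo := pvBsearch strs t 0 strs.length
  decide (lo < strs.length) && (PySem.List.pyGetD strs (lo : Int) "" == t)

def reverseStrings_alt (L : List String) : List String :=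
  let strs := PySem.List.sorted L (fun x => x)      -- sorted(x for x in L if type(x) is str)
  -- {x[::-1] for x in L if type(x) is str and present(x[::-1])}
  L.foldl (fun s x =>
    if pvPresent strs (pvRev x) then PySem.Set.add s (pvRev x) else s) []

-- ===== PRECONDITION & SPEC =====
def Spec_reverseStrings (L : List String) (out : List String) : Prop := out = reverseStrings_alt L
instance (L : List String) (out : List String) : Decidable (Spec_reverseStrings L out) := by unfold Spec_reverseStrings; infer_instance

-- ===== CLAIM (what is proved, stated in full; the proofs are below) =====
def Claim_equal_reverseStrings : Prop := ∀ (L : List String), Dom_reverseStrings L → Spec_reverseStrings L (reverseStrings L)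

-- ===== LEMMAS AND PROOFS =====

-- binary-search invariant on a ≤-sorted list: if everything below lo is < t and everything
-- from hi on is ≥ t, the returned index r ≤ length keeps both properties
theorem pvBsearch_inv (strs : List String) (t : String)
    (hsorted : List.Pairwise (· ≤ ·) strs) :
    ∀ (n lo hi : Nat), hi - lo = n → lo ≤ hi → hi ≤ strs.length →
    (∀ j (hj : j < strs.length), j < lo → strs[j] < t) →
    (∀ j (hj : j < strs.length), hi ≤ j → t ≤ strs[j]) →
    (∀ j (hj : j < strs.length), j < pvBsearch strs t lo hi → strs[j] < t) ∧
    (∀ j (hj : j < strs.length), pvBsearch strs t lo hi ≤ j → t ≤ strs[j]) ∧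
    pvBsearch strs t lo hi ≤ strs.length := by
  have mono : ∀ (i j : Nat) (hi : i < strs.length) (hj : j < strs.length),
      i ≤ j → strs[i] ≤ strs[j] := by
    intro i j hi hj hij
    rcases Nat.eq_or_lt_of_le hij with he | hlt
    · exact le_of_eq (by congr 1)
    · exact List.pairwise_iff_getElem.mp hsorted i j hi hj hlt
  intro n
  induction n using Nat.strong_induction_on with
  | _ n ih =>
    intro lo hi hn hle hhi hlow hhigh
    rw [pvBsearch]
    by_cases h : lo < hi
    · simp only [if_pos h]
      have hmid : (lo + hi) / 2 < strs.length := by omega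
      have hmid' : (lo + hi) / 2 < hi := by omega
      have hmidlo : lo ≤ (lo + hi) / 2 := by omega
      rw [PySem.List.pyGetD_eq_getElem strs "" (by positivity) (by exact_mod_cast hmid)]
      simp only [Int.toNat_natCast]
      by_cases hc : strs[(lo + hi) / 2] < t
      · simp only [if_pos hc]
        refine ih (hi - ((lo + hi) / 2 + 1)) (by omega) ((lo + hi) / 2 + 1) hi (by omega)
          (by omega) hhi ?_ hhigh
        intro j hj hjlt
        exact lt_of_le_of_lt (mono j ((lo + hi) / 2) hj hmid (by omega)) hc
      · simp only [if_neg hc]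
        refine ih (((lo + hi) / 2) - lo) (by omega) lo ((lo + hi) / 2) (by omega)
          (by omega) (by omega) hlow ?_
        intro j hj hjge
        exact le_trans (le_of_not_gt hc) (mono ((lo + hi) / 2) j hmid hj hjge)
    · simp only [if_neg h]
      exact ⟨fun j hj hjlt => hlow j hj hjlt, fun j hj hjge => hhigh j hj (by omega), by omega⟩

-- binary-search correctness: `present` over the sorted copy is list membership in L
theorem pvPresent_sorted_eq (L : List String) (t : String) :
    pvPresent (PySem.List.sorted L (fun x => x)) t = L.contains t := by
  set strs := PySem.List.sorted L (fun x => x) with hstrs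
  have hsorted : List.Pairwise (· ≤ ·) strs := PySem.List.sorted_pairwise L (fun x => x)
  obtain ⟨hlo, hhi, hlen⟩ := pvBsearch_inv strs t hsorted (strs.length - 0) 0 strs.length rfl
    (Nat.zero_le _) (le_refl _) (by omega) (fun j hj hge => by omega)
  set r := pvBsearch strs t 0 strs.length with hr
  have hmemL : ∀ x, x ∈ strs ↔ x ∈ L := fun x => PySem.List.mem_sorted L (fun x => x) false x
  show (decide (r < strs.length) && (PySem.List.pyGetD strs (r : Int) "" == t)) = L.contains t
  rcases Nat.lt_or_ge r strs.length with hrl | hrl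
  · rw [PySem.List.pyGetD_eq_getElem strs "" (by positivity) (by exact_mod_cast hrl)]
    simp only [Int.toNat_natCast, decide_eq_true hrl, Bool.true_and]
    by_cases he : strs[r] = t
    · have : t ∈ L := (hmemL t).mp (he ▸ List.getElem_mem hrl)
      simp [he, List.contains_eq_mem, this]
    · simp only [beq_eq_false_iff_ne.mpr he, Bool.false_eq, List.contains_eq_mem,
        decide_eq_false_iff_not]
      intro htL
      obtain ⟨j, hj, hje⟩ := List.mem_iff_getElem.mp ((hmemL t).mpr htL)
      have hjr : ¬ j < r := fun hlt => absurd (hje ▸ hlo j hj hlt) (lt_irrefl t)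
      have h1 : t ≤ strs[r] := hhi r hrl (le_refl r)
      have h2 : strs[r] ≤ t := hje ▸ (List.pairwise_iff_getElem.mp hsorted r j hrl hj
          |> fun f => by
            rcases Nat.eq_or_lt_of_le (Nat.le_of_not_lt hjr) with heq | hlt
            · exact le_of_eq (by subst heq; rfl)
            · exact f hlt)
      exact he (le_antisymm h2 h1)
  · have : ¬ r < strs.length := by omega
    simp only [decide_eq_false this, Bool.false_and, Bool.false_eq, List.contains_eq_mem,
      decide_eq_false_iff_not]
    intro htL
    obtain ⟨j, hj, hje⟩ := List.mem_iff_getElem.mp ((hmemL t).mpr htL)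
    have : j < r := by omega
    exact absurd (hje ▸ hlo j hj this) (lt_irrefl t)

theorem reverseStrings_eq_alt (L : List String) : reverseStrings L = reverseStrings_alt L := by
  unfold reverseStrings reverseStrings_alt
  rw [show (L.length : Int) = PySem.List.len L from rfl]
  rw [PySem.List.foldl_pyRange_pyGetD L "" (fun setty x =>
        if L.contains (pvRev x) then PySem.Set.add setty (pvRev x) else setty) [] (le_refl 0)]
  simp only [Int.toNat_zero, List.drop_zero]
  have hf : (fun (setty : List String) (x : String) =>
      if L.contains (pvRev x) then PySem.Set.add setty (pvRev x) else setty)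
      = (fun (s : List String) (x : String) =>
      if pvPresent (PySem.List.sorted L (fun x => x)) (pvRev x) then PySem.Set.add s (pvRev x) else s) := by
    funext s x
    rw [pvPresent_sorted_eq L (pvRev x)]
  rw [hf]

-- ===== VERDICT (by name: the statement is the Claim_ definition above) =====
theorem reverseStrings_spec : Claim_equal_reverseStrings := by
  intro L _
  unfold Spec_reverseStrings
  exact reverseStrings_eq_alt L
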